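-- pv_equiv track=rewrite | github.com/forecast-bio/atdata | src/atdata/_hf_api.py | _shards_to_wds_url
-- ===== SOURCE A (Python) =====
-- def _shards_to_wds_url(shards: list[str]) -> str:
--     """Convert a list of shard paths to a WebDataset URL.
--
--     WebDataset supports brace expansion, so we convert multiple shards
--     into brace notation when they share a common prefix/suffix.
--
--     Args:
--         shards: List of shard file paths.
--
--     Returns:
--         WebDataset-compatible URL string.
--
--     Examples:
--         >>> _shards_to_wds_url(["data-000.tar", "data-001.tar", "data-002.tar"])
--         "data-{000,001,002}.tar"
--         >>> _shards_to_wds_url(["train.tar"])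
--         "train.tar"
--     """
--     if len(shards) == 0:
--         raise ValueError("Cannot create URL from empty shard list")
--
--     if len(shards) == 1:
--         return shards[0]
--
--     # Find common prefix across ALL shards
--     prefix = shards[0]
--     for s in shards[1:]:
--         # Shorten prefix until it matches
--         while not s.startswith(prefix) and prefix:
--             prefix = prefix[:-1]
--
--     # Find common suffix across ALL shards
--     suffix = shards[0]
--     for s in shards[1:]:
--         # Shorten suffix until it matches
--         while not s.endswith(suffix) and suffix:
--             suffix = suffix[1:]
--
--     prefix_len = len(prefix)
--     suffix_len = len(suffix)
--
--     # Ensure prefix and suffix don't overlap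
--     min_shard_len = min(len(s) for s in shards)
--     if prefix_len + suffix_len > min_shard_len:
--         # Overlapping - prefer prefix, reduce suffix
--         suffix_len = max(0, min_shard_len - prefix_len)
--         suffix = shards[0][-suffix_len:] if suffix_len > 0 else ""
--
--     if prefix_len > 0 or suffix_len > 0:
--         # Extract the varying middle parts
--         middles = []
--         for s in shards:
--             if suffix_len > 0:
--                 middle = s[prefix_len:-suffix_len]
--             else:
--                 middle = s[prefix_len:]
--             middles.append(middle)
--
--         # Only use brace notation if we have meaningful variation
--         if all(middles):
--             return f"{prefix}{{{','.join(middles)}}}{suffix}"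
--
--     # Fallback: space-separated URLs for WebDataset
--     return " ".join(shards)
-- ===== SOURCE B (Python) =====
-- def _lcp(a: str, b: str) -> str:
--     out = []
--     for x, y in zip(a, b):
--         if x != y:
--             break
--         out.append(x)
--     return "".join(out)
--
--
-- def _shards_to_wds_url(shards: list[str]) -> str:
--     """Same contract as the original: brace-expand shards sharing a prefix/suffix.
--
--     The common prefix of the whole list equals the common prefix of its
--     lexicographic min and max; the common suffix is found the same way on the
--     reversed strings. So only two strings are ever compared per direction.
--     """
--     if not shards:
--         raise ValueError("Cannot create URL from empty shard list")
--     if len(shards) == 1: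
--         return shards[0]
--
--     prefix = _lcp(min(shards), max(shards))
--     rev = [s[::-1] for s in shards]
--     suffix = _lcp(min(rev), max(rev))[::-1]
--
--     n = min(map(len, shards))
--     plen = len(prefix)
--     slen = min(len(suffix), max(0, n - plen))  # keep prefix, trim suffix on overlap
--     suffix = suffix[len(suffix) - slen:]
--
--     middles = [s[plen:len(s) - slen] for s in shards]
--     if (plen > 0 or slen > 0) and all(middles):
--         return prefix + "{" + ",".join(middles) + "}" + suffix
--     return " ".join(shards)
-- ===== Notes on version B (the rewrite author's own statement) =====
-- stated objective: alternative
-- what changed: B finds the common prefix by char-comparing only the two lexicographic extremes min(shards)/max(shards) (and the extremes of the reversed strings for the suffix) instead of A's repeated shorten-until-startswith/endswith scans over every shard, and computes the overlap-trimmed suffix and middles branch-free from the suffix itself.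
import Mathlib
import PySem

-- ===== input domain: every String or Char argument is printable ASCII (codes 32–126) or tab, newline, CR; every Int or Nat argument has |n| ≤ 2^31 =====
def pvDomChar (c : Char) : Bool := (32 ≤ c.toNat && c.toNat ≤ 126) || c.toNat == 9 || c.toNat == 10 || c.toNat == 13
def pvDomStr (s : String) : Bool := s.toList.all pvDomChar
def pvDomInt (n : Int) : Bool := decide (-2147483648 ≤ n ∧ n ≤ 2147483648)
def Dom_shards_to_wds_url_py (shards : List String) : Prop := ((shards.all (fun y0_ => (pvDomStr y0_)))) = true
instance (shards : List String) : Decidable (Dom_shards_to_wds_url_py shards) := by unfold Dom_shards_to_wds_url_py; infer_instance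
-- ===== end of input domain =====

-- B replaces A's shorten-until-match scans of every shard by comparing only the
-- lexicographic min/max extremes (and of the reversed strings for the suffix);
-- objective: alternative (same result, different discovery algorithm).

-- ===== PORT A =====
-- while not s.startswith(prefix) and prefix: prefix = prefix[:-1]
def pvShrinkPrefixA (s p : List Char) : List Char :=
  if h : PySem.Chars.startswith s p = true then p
  else pvShrinkPrefixA s p.dropLast
termination_by p.length
decreasing_by
  have hp : p ≠ [] := by
    intro hp; subst hp
    exact h ((PySem.Chars.startswith_iff s []).mpr (List.nil_prefix))
  have := List.length_pos_iff.mpr hp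
  simp [List.length_dropLast]; omega

-- while not s.endswith(suffix) and suffix: suffix = suffix[1:]
def pvShrinkSuffixA (s p : List Char) : List Char :=
  if h : PySem.Chars.endswith s p = true then p
  else pvShrinkSuffixA s p.tail
termination_by p.length
decreasing_by
  have hp : p ≠ [] := by
    intro hp; subst hp
    exact h ((PySem.Chars.endswith_iff s []).mpr (List.nil_suffix))
  have := List.length_pos_iff.mpr hp
  simp [List.length_tail]; omega

def shards_to_wds_url_py (shards : List String) : String :=
  match shards with
  | [] => ""          -- unreachable: Python raises ValueError here (Pre_ excludes [])
  | [s] => s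
  | s0 :: s1 :: rest =>
    let c0 := s0.toList
    let restC := (s1 :: rest).map String.toList
    -- prefix loop over shards[1:]
    let pre := restC.foldl (fun p s => pvShrinkPrefixA s p) c0
    -- suffix loop over shards[1:]
    let suf0 := restC.foldl (fun p s => pvShrinkSuffixA s p) c0
    let plen := pre.length
    -- min(len(s) for s in shards): the running-min loop
    let minLen := (restC.map List.length).foldl min c0.length
    -- overlap adjustment; Python's max(0, minLen - plen) is Nat subtraction
    let slen := if plen + suf0.length > minLen then minLen - plen else suf0.length
    let suf := if plen + suf0.length > minLen then
        (if minLen - plen > 0 then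
           PySem.List.slice c0 (some (-(((minLen - plen : Nat)) : Int))) none
         else [])
      else suf0
    if plen > 0 || slen > 0 then
      -- for s in shards: middles.append(...)
      let middles := (c0 :: restC).foldl (fun acc s =>
        acc ++ [if slen > 0 then
                  PySem.List.slice s (some (plen : Int)) (some (-((slen : Nat) : Int)))
                else PySem.List.slice s (some (plen : Int)) none]) []
      if middles.all (fun m => !m.isEmpty) then
        String.ofList (pre ++ ('{' :: PySem.Chars.join [','] middles) ++ ('}' :: suf))
      else PySem.Str.join " " shards
    else PySem.Str.join " " shards

-- ===== PORT B =====
-- min()/max() on Python strings (as char lists): PySem.List.min?/max? with the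
-- lexicographic LinearOrder on List Char pinned as the order instance.
def pvMinL (cs : List (List Char)) : Option (List Char) :=
  @PySem.List.min? _ _ LinearOrder.toPartialOrder.toLT LinearOrder.toDecidableLT cs (fun x => x)
def pvMaxL (cs : List (List Char)) : Option (List Char) :=
  @PySem.List.max? _ _ LinearOrder.toPartialOrder.toLT LinearOrder.toDecidableLT cs (fun x => x)

def pvLcpB (a b : List Char) : List Char :=
  match a, b with
  | x :: a', y :: b' => if x = y then x :: pvLcpB a' b' else []
  | _, _ => []

def shards_to_wds_url_py_alt (shards : List String) : String :=
  match shards with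
  | [] => ""          -- unreachable: raises ValueError (Pre_ excludes [])
  | [s] => s
  | _ :: _ :: _ =>
    let cs := shards.map String.toList
    match pvMinL cs, pvMaxL cs with
    | some lo, some hi =>
      let pre := pvLcpB lo hi
      let rcs := cs.map List.reverse
      match pvMinL rcs, pvMaxL rcs with
      | some rlo, some rhi =>
        let suf0 := (pvLcpB rlo rhi).reverse
        -- min(map(len, shards)); the list is nonempty so getD's default is never used
        let n := (PySem.List.min? (cs.map List.length) (fun x => x)).getD 0
        let plen := pre.length
        let slen := min suf0.length (n - plen)   -- max(0, n - plen) is Nat subtraction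
        let suf := suf0.drop (suf0.length - slen)
        let middles := cs.map (fun s =>
          PySem.List.slice s (some (plen : Int)) (some ((s.length : Int) - (slen : Int))))
        if (plen > 0 || slen > 0) && middles.all (fun m => !m.isEmpty) then
          String.ofList (pre ++ ('{' :: PySem.Chars.join [','] middles) ++ ('}' :: suf))
        else PySem.Str.join " " shards
      | _, _ => ""    -- unreachable (rcs nonempty)
    | _, _ => ""      -- unreachable (cs nonempty)

-- ===== PRECONDITION & SPEC =====
-- Pre_ excludes only the empty list, on which Python A raises ValueError.
def Pre_shards_to_wds_url_py (shards : List String) : Prop := shards ≠ []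
instance (shards : List String) : Decidable (Pre_shards_to_wds_url_py shards) := by unfold Pre_shards_to_wds_url_py; infer_instance
def pvWitness_shards_to_wds_url_py : List String := ["data-000.tar", "data-001.tar"]

def Spec_shards_to_wds_url_py (shards : List String) (out : String) : Prop := out = shards_to_wds_url_py_alt shards
instance (shards : List String) (out : String) : Decidable (Spec_shards_to_wds_url_py shards out) := by unfold Spec_shards_to_wds_url_py; infer_instance

-- ===== CLAIM (what is proved, stated in full; the proofs are below) =====
def Claim_equal_shards_to_wds_url_py : Prop := ∀ (shards : List String), Dom_shards_to_wds_url_py shards → Pre_shards_to_wds_url_py shards → Spec_shards_to_wds_url_py shards (shards_to_wds_url_py shards)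

-- ===== LEMMAS AND PROOFS =====

theorem pvLcpB_prefix_left (a b : List Char) : pvLcpB a b <+: a := by
  induction a generalizing b with
  | nil => simp [pvLcpB]
  | cons x a' ih =>
    cases b with
    | nil => simp [pvLcpB]
    | cons y b' =>
      by_cases h : x = y
      · subst h; simpa [pvLcpB] using ih b'
      · simp [pvLcpB, h]


theorem pvLcpB_prefix_right (a b : List Char) : pvLcpB a b <+: b := by
  induction a generalizing b with
  | nil => simp [pvLcpB]
  | cons x a' ih =>
    cases b with
    | nil => simp [pvLcpB]
    | cons y b' =>
      by_cases h : x = y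
      · subst h; simpa [pvLcpB] using ih b'
      · simp [pvLcpB, h]


theorem pvLcpB_greatest (q a b : List Char) (ha : q <+: a) (hb : q <+: b) :
    q <+: pvLcpB a b := by
  induction q generalizing a b with
  | nil => exact List.nil_prefix
  | cons x q' ih =>
    obtain ⟨a', rfl, ha'⟩ : ∃ a', a = x :: a' ∧ q' <+: a' := by
      cases a with
      | nil => simpa using ha
      | cons z a' =>
        rw [List.cons_prefix_cons] at ha
        exact ⟨a', by rw [ha.1], ha.2⟩
    obtain ⟨b', rfl, hb'⟩ : ∃ b', b = x :: b' ∧ q' <+: b' := by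
      cases b with
      | nil => simpa using hb
      | cons z b' =>
        rw [List.cons_prefix_cons] at hb
        exact ⟨b', by rw [hb.1], hb.2⟩
    simpa [pvLcpB, List.cons_prefix_cons] using ih a' b' ha' hb'


-- anything lexicographically between a and b inherits every common prefix of a and b
theorem pv_lex_between (p a b c : List Char) (ha : p <+: a) (hb : p <+: b)
    (hac : a ≤ c) (hcb : c ≤ b) : p <+: c := by
  induction p generalizing a b c with
  | nil => exact List.nil_prefix
  | cons x p' ih =>
    obtain ⟨a', rfl, ha'⟩ : ∃ a', a = x :: a' ∧ p' <+: a' := by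
      cases a with
      | nil => simp at ha
      | cons z a' => rw [List.cons_prefix_cons] at ha; exact ⟨a', by rw [ha.1], ha.2⟩
    obtain ⟨b', rfl, hb'⟩ : ∃ b', b = x :: b' ∧ p' <+: b' := by
      cases b with
      | nil => simp at hb
      | cons z b' => rw [List.cons_prefix_cons] at hb; exact ⟨b', by rw [hb.1], hb.2⟩
    cases c with
    | nil =>
      -- x :: a' ≤ [] is impossible
      rcases lt_or_eq_of_le hac with h | h
      · exact absurd h (by intro hlt; cases hlt)
      · exact absurd h (by simp)
    | cons y c' =>
      have h1 : x < y ∨ (x = y ∧ a' ≤ c') := by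
        rcases lt_or_eq_of_le hac with h | h
        · cases h with
          | cons h => exact Or.inr ⟨rfl, le_of_lt h⟩
          | rel h => exact Or.inl h
        · injection h with h1 h2; subst h1; subst h2; exact Or.inr ⟨rfl, le_rfl⟩
      have h2 : y < x ∨ (y = x ∧ c' ≤ b') := by
        rcases lt_or_eq_of_le hcb with h | h
        · cases h with
          | cons h => exact Or.inr ⟨rfl, le_of_lt h⟩
          | rel h => exact Or.inl h
        · injection h with h1 h2; subst h1; subst h2; exact Or.inr ⟨rfl, le_rfl⟩
      rcases h1 with h1 | ⟨heq1, h1⟩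
      · rcases h2 with h2 | ⟨heq2, h2⟩
        · exact absurd (h1.trans h2) (lt_irrefl _)
        · subst heq2; exact absurd h1 (lt_irrefl _)
      · subst heq1
        rcases h2 with h2 | ⟨heq2, h2⟩
        · exact absurd h2 (lt_irrefl _)
        · rw [List.cons_prefix_cons]
          exact ⟨rfl, ih a' b' c' ha' hb' h1 h2⟩


theorem pvShrinkPrefixA_prefix_fst (s p : List Char) : pvShrinkPrefixA s p <+: p := by
  induction p using pvShrinkPrefixA.induct (s := s) with
  | case1 p h => rw [pvShrinkPrefixA, dif_pos h]
  | case2 p h ih =>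
    rw [pvShrinkPrefixA, dif_neg h]
    exact ih.trans (List.dropLast_prefix p)


theorem pvShrinkPrefixA_prefix_snd (s p : List Char) : pvShrinkPrefixA s p <+: s := by
  induction p using pvShrinkPrefixA.induct (s := s) with
  | case1 p h => rw [pvShrinkPrefixA, dif_pos h]; exact (PySem.Chars.startswith_iff s p).mp h
  | case2 p h ih => rw [pvShrinkPrefixA, dif_neg h]; exact ih


theorem pvShrinkPrefixA_greatest (s p q : List Char) (hp : q <+: p) (hs : q <+: s) :
    q <+: pvShrinkPrefixA s p := by
  revert hp
  induction p using pvShrinkPrefixA.induct (s := s) with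
  | case1 p h => intro hp; rw [pvShrinkPrefixA, dif_pos h]; exact hp
  | case2 p h ih =>
    intro hp
    rw [pvShrinkPrefixA, dif_neg h]
    apply ih
    · have hne : q ≠ p := by
        rintro rfl; exact h ((PySem.Chars.startswith_iff s q).mpr hs)
      have hlt : q.length < p.length := by
        rcases lt_or_eq_of_le hp.length_le with h' | h'
        · exact h'
        · exact absurd (hp.eq_of_length_le (le_of_eq h'.symm)) hne
      rw [List.dropLast_eq_take]
      exact List.prefix_take_iff.mpr ⟨hp, by omega⟩


theorem pvShrinkSuffixA_suffix_fst (s p : List Char) : pvShrinkSuffixA s p <:+ p := by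
  induction p using pvShrinkSuffixA.induct (s := s) with
  | case1 p h => rw [pvShrinkSuffixA, dif_pos h]
  | case2 p h ih =>
    rw [pvShrinkSuffixA, dif_neg h]
    exact ih.trans (List.tail_suffix p)


theorem pvShrinkSuffixA_suffix_snd (s p : List Char) : pvShrinkSuffixA s p <:+ s := by
  induction p using pvShrinkSuffixA.induct (s := s) with
  | case1 p h => rw [pvShrinkSuffixA, dif_pos h]; exact (PySem.Chars.endswith_iff s p).mp h
  | case2 p h ih => rw [pvShrinkSuffixA, dif_neg h]; exact ih


theorem pvShrinkSuffixA_greatest (s p q : List Char) (hp : q <:+ p) (hs : q <:+ s) :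
    q <:+ pvShrinkSuffixA s p := by
  revert hp
  induction p using pvShrinkSuffixA.induct (s := s) with
  | case1 p h => intro hp; rw [pvShrinkSuffixA, dif_pos h]; exact hp
  | case2 p h ih =>
    intro hp
    rw [pvShrinkSuffixA, dif_neg h]
    apply ih
    · have hne : q ≠ p := by
        rintro rfl; exact h ((PySem.Chars.endswith_iff s q).mpr hs)
      obtain ⟨t, rfl⟩ := hp
      cases t with
      | nil => simp at hne
      | cons z t => simpa using List.suffix_append t q


theorem pvFoldPrefix_common (c0 : List Char) (l : List (List Char)) :
    ∀ c ∈ c0 :: l, l.foldl (fun p s => pvShrinkPrefixA s p) c0 <+: c := by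
  induction l generalizing c0 with
  | nil => intro c hc; simp at hc; subst hc; simp
  | cons s t ih =>
    intro c hc
    simp only [List.foldl_cons]
    rcases List.mem_cons.mp hc with rfl | hc
    · exact (ih _ _ (List.mem_cons_self)).trans (pvShrinkPrefixA_prefix_fst s c)
    · rcases List.mem_cons.mp hc with rfl | hc
      · exact (ih _ _ (List.mem_cons_self)).trans (pvShrinkPrefixA_prefix_snd c c0)
      · exact ih _ _ (List.mem_cons_of_mem _ hc)


theorem pvFoldPrefix_greatest (c0 : List Char) (l : List (List Char)) (q : List Char)
    (h0 : q <+: c0) (hl : ∀ c ∈ l, q <+: c) :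
    q <+: l.foldl (fun p s => pvShrinkPrefixA s p) c0 := by
  induction l generalizing c0 with
  | nil => simpa using h0
  | cons s t ih =>
    simp only [List.foldl_cons]
    exact ih _ (pvShrinkPrefixA_greatest s c0 q h0 (hl s List.mem_cons_self))
      (fun c hc => hl c (List.mem_cons_of_mem _ hc))


theorem pvFoldSuffix_common (c0 : List Char) (l : List (List Char)) :
    ∀ c ∈ c0 :: l, l.foldl (fun p s => pvShrinkSuffixA s p) c0 <:+ c := by
  induction l generalizing c0 with
  | nil => intro c hc; simp at hc; subst hc; simp
  | cons s t ih =>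
    intro c hc
    simp only [List.foldl_cons]
    rcases List.mem_cons.mp hc with rfl | hc
    · exact (ih _ _ (List.mem_cons_self)).trans (pvShrinkSuffixA_suffix_fst s c)
    · rcases List.mem_cons.mp hc with rfl | hc
      · exact (ih _ _ (List.mem_cons_self)).trans (pvShrinkSuffixA_suffix_snd c c0)
      · exact ih _ _ (List.mem_cons_of_mem _ hc)


theorem pvFoldSuffix_greatest (c0 : List Char) (l : List (List Char)) (q : List Char)
    (h0 : q <:+ c0) (hl : ∀ c ∈ l, q <:+ c) :
    q <:+ l.foldl (fun p s => pvShrinkSuffixA s p) c0 := by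
  induction l generalizing c0 with
  | nil => simpa using h0
  | cons s t ih =>
    simp only [List.foldl_cons]
    exact ih _ (pvShrinkSuffixA_greatest s c0 q h0 (hl s List.mem_cons_self))
      (fun c hc => hl c (List.mem_cons_of_mem _ hc))


theorem pvMinL_le {cs : List (List Char)} {lo : List Char} (h : pvMinL cs = some lo) :
    ∀ c ∈ cs, lo ≤ c := by
  intro c hc
  unfold pvMinL at h
  simpa using PySem.List.min?_isMin h c hc

theorem pvMaxL_ge {cs : List (List Char)} {hi : List Char} (h : pvMaxL cs = some hi) :
    ∀ c ∈ cs, c ≤ hi := by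
  intro c hc
  unfold pvMaxL at h
  simpa using PySem.List.max?_isMax h c hc

theorem pvMinL_mem {cs : List (List Char)} {lo : List Char} (h : pvMinL cs = some lo) : lo ∈ cs := by
  unfold pvMinL at h
  exact @PySem.List.min?_mem _ _ LinearOrder.toPartialOrder.toLT LinearOrder.toDecidableLT _ _ _ h

theorem pvMaxL_mem {cs : List (List Char)} {hi : List Char} (h : pvMaxL cs = some hi) : hi ∈ cs := by
  unfold pvMaxL at h
  exact @PySem.List.max?_mem _ _ LinearOrder.toPartialOrder.toLT LinearOrder.toDecidableLT _ _ _ h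

theorem pvMinL_isSome {cs : List (List Char)} (h : cs ≠ []) : ∃ lo, pvMinL cs = some lo := by
  cases hm : pvMinL cs with
  | none => unfold pvMinL at hm; rw [@PySem.List.min?_eq_none_iff _ _ LinearOrder.toPartialOrder.toLT LinearOrder.toDecidableLT] at hm; exact absurd hm h
  | some lo => exact ⟨lo, rfl⟩

theorem pvMaxL_isSome {cs : List (List Char)} (h : cs ≠ []) : ∃ hi, pvMaxL cs = some hi := by
  cases hm : pvMaxL cs with
  | none => unfold pvMaxL at hm; rw [@PySem.List.max?_eq_none_iff _ _ LinearOrder.toPartialOrder.toLT LinearOrder.toDecidableLT] at hm; exact absurd hm h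
  | some hi => exact ⟨hi, rfl⟩

theorem pvMiddle_eq (c : List Char) (plen slen : Nat) (hp : plen ≤ c.length) (hs : slen ≤ c.length) :
    (if slen > 0 then PySem.List.slice c (some (plen : Int)) (some (-((slen : Nat) : Int)))
     else PySem.List.slice c (some (plen : Int)) none)
    = PySem.List.slice c (some (plen : Int)) (some ((c.length : Int) - ((slen : Nat) : Int))) := by
  have hcast : ((c.length : Int) - ((slen : Nat) : Int)) = (((c.length - slen : Nat)) : Int) := by
    omega
  rw [hcast, PySem.List.slice_natCast]
  by_cases h : slen > 0
  · rw [if_pos h]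
    simp only [PySem.List.slice, PySem.List.clampIdx_natCast, PySem.List.clampIdx_neg_natCast _ _ h]
    rw [min_eq_left hp]
  · rw [if_neg h]
    have hz : slen = 0 := by omega
    subst hz
    rw [PySem.List.slice_from_natCast]
    have : (List.drop plen c).length ≤ c.length - 0 - plen := by simp
    rw [List.take_of_length_le this]

theorem pvSufAdj_eq (c0 suf0 : List Char) (plen n : Nat) (hsc : suf0 <:+ c0)
    (hpn : plen ≤ n) (hnc : n ≤ c0.length) :
    (if plen + suf0.length > n then
       (if n - plen > 0 then PySem.List.slice c0 (some (-(((n - plen : Nat)) : Int))) none else [])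
     else suf0)
    = suf0.drop (suf0.length - min suf0.length (n - plen)) := by
  by_cases hov : plen + suf0.length > n
  · rw [if_pos hov]
    have hmin : min suf0.length (n - plen) = n - plen := by omega
    rw [hmin]
    by_cases hk : n - plen > 0
    · rw [if_pos hk, PySem.List.slice_from_neg_natCast _ _ hk]
      obtain ⟨t, rfl⟩ := hsc
      rw [List.length_append, List.drop_append]
      rw [List.drop_eq_nil_of_le (by omega), List.nil_append,
        show t.length + suf0.length - (n - plen) - t.length = suf0.length - (n - plen) from by omega]
    · rw [if_neg hk]
      have : suf0.length - (n - plen) = suf0.length := by omega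
      rw [this, List.drop_length]
  · rw [if_neg hov]
    have hmin : min suf0.length (n - plen) = suf0.length := by omega
    rw [hmin]
    simp

theorem pvIf_assoc {α : Type} (a c : Bool) (X J : α) :
    (if a = true then (if c = true then X else J) else J) = (if (a && c) = true then X else J) := by
  cases a <;> cases c <;> simp

-- ===== VERDICT (by name: the statement is the Claim_ definition above) =====
theorem shards_to_wds_url_py_spec : Claim_equal_shards_to_wds_url_py := by
  intro shards _ hpre
  unfold Spec_shards_to_wds_url_py
  match shards with
  | [] => exact absurd rfl hpre
  | [s] => rfl
  | s0 :: s1 :: rest =>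
    obtain ⟨lo, hlo⟩ := pvMinL_isSome (cs := (s0 :: s1 :: rest).map String.toList) (by simp)
    obtain ⟨hi, hhi⟩ := pvMaxL_isSome (cs := (s0 :: s1 :: rest).map String.toList) (by simp)
    obtain ⟨rlo, hrlo⟩ := pvMinL_isSome (cs := ((s0 :: s1 :: rest).map String.toList).map List.reverse) (by simp)
    obtain ⟨rhi, hrhi⟩ := pvMaxL_isSome (cs := ((s0 :: s1 :: rest).map String.toList).map List.reverse) (by simp)
    simp only [List.map_cons] at hlo hhi hrlo hrhi
    have hlomem : lo ∈ (s0.toList :: s1.toList :: List.map String.toList rest) := pvMinL_mem hlo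
    have dhimem : hi ∈ (s0.toList :: s1.toList :: List.map String.toList rest) := pvMaxL_mem hhi
    -- every shard is lexicographically between lo and hi, so it inherits their common prefix
    have hpreall : ∀ c ∈ (s0.toList :: s1.toList :: List.map String.toList rest),
        pvLcpB lo hi <+: c := by
      intro c hc
      exact pv_lex_between _ _ _ _ (pvLcpB_prefix_left lo hi) (pvLcpB_prefix_right lo hi)
        (pvMinL_le hlo c hc) (pvMaxL_ge hhi c hc)
    have hsufall : ∀ c ∈ (s0.toList :: s1.toList :: List.map String.toList rest),
        (pvLcpB rlo rhi).reverse <:+ c := by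
      intro c hc
      have hcrev : c.reverse ∈ (s0.toList.reverse :: s1.toList.reverse ::
          List.map List.reverse (List.map String.toList rest)) := by
        simpa using List.mem_map_of_mem (f := List.reverse) hc
      have h1 : pvLcpB rlo rhi <+: c.reverse :=
        pv_lex_between _ _ _ _ (pvLcpB_prefix_left rlo rhi) (pvLcpB_prefix_right rlo rhi)
          (pvMinL_le hrlo _ hcrev) (pvMaxL_ge hrhi _ hcrev)
      rw [show pvLcpB rlo rhi = (pvLcpB rlo rhi).reverse.reverse from (List.reverse_reverse _).symm] at h1
      exact List.reverse_prefix.mp h1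
    -- A's scanning prefix equals B's extremes prefix
    have hFP : List.foldl (fun p s => pvShrinkPrefixA s p) s0.toList
        (s1.toList :: List.map String.toList rest) = pvLcpB lo hi := by
      have h1 := pvLcpB_greatest _ lo hi
        (pvFoldPrefix_common s0.toList (s1.toList :: List.map String.toList rest) lo hlomem)
        (pvFoldPrefix_common s0.toList (s1.toList :: List.map String.toList rest) hi dhimem)
      have h2 := pvFoldPrefix_greatest s0.toList (s1.toList :: List.map String.toList rest) (pvLcpB lo hi)
        (hpreall s0.toList List.mem_cons_self)
        (fun c hc => hpreall c (List.mem_cons_of_mem _ hc))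
      exact h1.eq_of_length_le h2.length_le
    -- A's scanning suffix equals B's reversed-extremes suffix
    have hFS : List.foldl (fun p s => pvShrinkSuffixA s p) s0.toList
        (s1.toList :: List.map String.toList rest) = (pvLcpB rlo rhi).reverse := by
      have hrev : ∀ c ∈ (s0.toList :: s1.toList :: List.map String.toList rest),
          (List.foldl (fun p s => pvShrinkSuffixA s p) s0.toList
          (s1.toList :: List.map String.toList rest)).reverse <+: c.reverse := by
        intro c hc
        exact List.reverse_prefix.mpr
          (pvFoldSuffix_common s0.toList (s1.toList :: List.map String.toList rest) c hc)
      have hrlomem : rlo ∈ List.map List.reverse (s0.toList :: s1.toList ::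
          List.map String.toList rest) := by simpa using pvMinL_mem hrlo
      have hrhimem : rhi ∈ List.map List.reverse (s0.toList :: s1.toList ::
          List.map String.toList rest) := by simpa using pvMaxL_mem hrhi
      obtain ⟨clo, hclo, hcloeq⟩ := List.mem_map.mp hrlomem
      obtain ⟨chi, hchi, hchieq⟩ := List.mem_map.mp hrhimem
      have h1 : (List.foldl (fun p s => pvShrinkSuffixA s p) s0.toList
          (s1.toList :: List.map String.toList rest)).reverse <+: pvLcpB rlo rhi :=
        pvLcpB_greatest _ rlo rhi (hcloeq ▸ hrev clo hclo) (hchieq ▸ hrev chi hchi)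
      have h1' : List.foldl (fun p s => pvShrinkSuffixA s p) s0.toList
          (s1.toList :: List.map String.toList rest) <:+ (pvLcpB rlo rhi).reverse := by
        apply List.reverse_prefix.mp
        rwa [List.reverse_reverse]
      have h2 := pvFoldSuffix_greatest s0.toList (s1.toList :: List.map String.toList rest)
        ((pvLcpB rlo rhi).reverse)
        (hsufall s0.toList List.mem_cons_self)
        (fun c hc => hsufall c (List.mem_cons_of_mem _ hc))
      exact h1'.eq_of_length_le h2.length_le
    -- min(len(s) for s in shards)
    have hnmin : PySem.List.min? (s0.toList.length :: s1.toList.length ::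
        List.map List.length (List.map String.toList rest)) (fun x => x)
        = some (List.foldl min s0.toList.length
            (s1.toList.length :: List.map List.length (List.map String.toList rest))) :=
      PySem.List.min?_id_cons _ _
    have hNle : ∀ c ∈ (s0.toList :: s1.toList :: List.map String.toList rest),
        List.foldl min s0.toList.length
        (s1.toList.length :: List.map List.length (List.map String.toList rest)) ≤ c.length := by
      intro c hc
      have hmem : c.length ∈ (s0.toList.length :: s1.toList.length ::
          List.map List.length (List.map String.toList rest)) := by
        simpa using List.mem_map_of_mem (f := List.length) hc
      simpa using PySem.List.min?_isMin hnmin c.length hmem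
    have hNmem : ∃ c ∈ (s0.toList :: s1.toList :: List.map String.toList rest),
        c.length = List.foldl min s0.toList.length
        (s1.toList.length :: List.map List.length (List.map String.toList rest)) := by
      have hm := PySem.List.min?_mem hnmin
      have hm' : List.foldl min s0.toList.length
          (s1.toList.length :: List.map List.length (List.map String.toList rest))
          ∈ List.map List.length (s0.toList :: s1.toList :: List.map String.toList rest) := by
        simpa using hm
      obtain ⟨c, hc, hceq⟩ := List.mem_map.mp hm'
      exact ⟨c, hc, hceq⟩
    obtain ⟨cN, hcN, hcNeq⟩ := hNmem
    have hPN : (pvLcpB lo hi).length ≤ List.foldl min s0.toList.length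
        (s1.toList.length :: List.map List.length (List.map String.toList rest)) :=
      hcNeq ▸ (hpreall cN hcN).length_le
    -- unfold both ports and align the discovery phase
    simp only [shards_to_wds_url_py, shards_to_wds_url_py_alt, List.map_cons,
      hlo, hhi, hrlo, hrhi, hnmin, Option.getD_some]
    simp only [hFP, hFS]
    -- the overlap-adjusted suffix length
    simp only [show (if (pvLcpB lo hi).length + ((pvLcpB rlo rhi).reverse).length >
          List.foldl min s0.toList.length
            (s1.toList.length :: List.map List.length (List.map String.toList rest)) then
          List.foldl min s0.toList.length
            (s1.toList.length :: List.map List.length (List.map String.toList rest)) -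
            (pvLcpB lo hi).length
        else ((pvLcpB rlo rhi).reverse).length)
        = min ((pvLcpB rlo rhi).reverse).length
            (List.foldl min s0.toList.length
              (s1.toList.length :: List.map List.length (List.map String.toList rest)) -
              (pvLcpB lo hi).length) from by split_ifs <;> omega]
    -- the overlap-adjusted suffix
    simp only [pvSufAdj_eq s0.toList ((pvLcpB rlo rhi).reverse) (pvLcpB lo hi).length
      (List.foldl min s0.toList.length
        (s1.toList.length :: List.map List.length (List.map String.toList rest)))
      (hsufall s0.toList List.mem_cons_self) hPN (hNle s0.toList List.mem_cons_self)]
    -- the middles: A's append loop is a map, elementwise equal to B's slices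
    simp only [PySem.List.foldl_append_singleton_eq_map]
    simp only [List.map_congr_left (fun c hc => pvMiddle_eq c (pvLcpB lo hi).length
      (min ((pvLcpB rlo rhi).reverse).length
        (List.foldl min s0.toList.length
          (s1.toList.length :: List.map List.length (List.map String.toList rest)) -
          (pvLcpB lo hi).length))
      ((hpreall c hc).length_le)
      (le_trans (by omega) (hNle c hc)))]
    exact pvIf_assoc _ _ _ _
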